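-- pv_equiv track=rewrite | github.com/17mirinae/CTF-Python | Python/SEOKCHAN/수학2/1.소수찾기.py | solve
-- ===== SOURCE A (Python) =====
-- def solve(num_list):
--     max_num = max(num_list)
--     nums = [True for i in range(0, max_num+1)]
--     nums[0] = nums[1] = False
--     for i in range(0, max_num + 1):
--         if nums[i] is False:
--             continue
--         j = 2
--         while j * i <= max_num:
--             nums[i * j] = False
--             j += 1
--     res = 0
--     for num in num_list:
--         if nums[num] is True:
--             res += 1
--     return res
-- ===== SOURCE B (Python) =====
-- def is_prime(k):
--     if k < 2:
--         return False
--     d = 2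
--     while d * d <= k:
--         if k % d == 0:
--             return False
--         d += 1
--     return True
--
--
-- def solve(num_list):
--     max_num = max(num_list)
--     nums = [is_prime(i) for i in range(0, max_num + 1)]
--     res = 0
--     for num in num_list:
--         if nums[num]:
--             res += 1
--     return res
-- ===== Notes on version B (the rewrite author's own statement) =====
-- stated objective: alternative
-- what changed: The prime table of length max+1 is built by independent trial division per index (is_prime testing divisors from 2 up to the square root) instead of A's sieve that marks multiples in a mutable list, and A's double assignment clearing the two lowest entries disappears; the counting pass over num_list is unchanged.
-- outside the precondition, e.g. on solve([0]): A raises IndexError, B returns 0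
import Mathlib
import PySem

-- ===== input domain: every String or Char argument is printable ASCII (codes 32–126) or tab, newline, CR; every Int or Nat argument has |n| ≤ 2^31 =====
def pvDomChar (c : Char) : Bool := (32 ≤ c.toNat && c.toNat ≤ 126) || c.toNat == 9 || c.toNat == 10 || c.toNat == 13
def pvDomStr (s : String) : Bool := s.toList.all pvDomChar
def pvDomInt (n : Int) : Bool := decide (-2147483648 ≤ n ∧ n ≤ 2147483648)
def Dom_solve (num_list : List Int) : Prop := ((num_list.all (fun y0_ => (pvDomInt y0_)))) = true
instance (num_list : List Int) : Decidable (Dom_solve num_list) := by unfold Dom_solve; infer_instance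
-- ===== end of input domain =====

-- B rebuilds A's prime table by per-index trial division instead of A's sieve marking multiples;
-- same table shape and same counting pass (objective: alternative).

-- ===== PORT A =====
-- inner 'while j * i <= max_num' loop; the '1 ≤ i' conjunct is a totality guard only:
-- in Python the loop body is reached only for i ≥ 2 (nums[0] and nums[1] are False).
def pvInner (m i : Int) (j : Int) (nums : List Bool) : List Bool :=
  if h : j * i ≤ m ∧ 1 ≤ i then
    pvInner m i (j + 1) (nums.set (i * j).toNat false)
  else nums
termination_by (m + 1 - j * i).toNat
decreasing_by
  have h1 := h.1; have h2 := h.2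
  have : (j + 1) * i = j * i + i := by ring
  omega

def solve (num_list : List Int) : Int :=
  match PySem.List.max? num_list id with
  | none => 0    -- max([]) raises ValueError; excluded by Pre_solve
  | some max_num =>
    let nums0 := (PySem.List.pyRange 0 (max_num + 1)).map (fun _ => true)
    -- nums[0] = nums[1] = False  (IndexError when max_num < 1; excluded by Pre_solve; List.set is a no-op there)
    let nums1 := (nums0.set 0 false).set 1 false
    let nums := (PySem.List.pyRange 0 (max_num + 1)).foldl
      (fun ns i => if ns.getD i.toNat true = false then ns else pvInner max_num i 2 ns) nums1
    num_list.foldl (fun res num => if (PySem.List.pyGet? nums num).getD false = true then res + 1 else res) 0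

-- ===== PORT B =====
-- trial-division loop 'while d * d <= k'; the '2 ≤ d' conjunct is a totality guard only (d starts at 2 and grows).
def pvTrial (k : Int) (d : Int) : Bool :=
  if h : d * d ≤ k ∧ 2 ≤ d then
    if PySem.Int.mod k d = 0 then false else pvTrial k (d + 1)
  else true
termination_by (k + 1 - d).toNat
decreasing_by
  have h1 := h.1; have h2 := h.2
  have : 2 * d ≤ d * d := by nlinarith
  omega

def pvIsPrime (k : Int) : Bool := if k < 2 then false else pvTrial k 2

def solve_alt (num_list : List Int) : Int :=
  match PySem.List.max? num_list id with
  | none => 0    -- max([]) raises ValueError; excluded by Pre_solve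
  | some max_num =>
    let nums := (PySem.List.pyRange 0 (max_num + 1)).map pvIsPrime
    num_list.foldl (fun res num => if (PySem.List.pyGet? nums num).getD false then res + 1 else res) 0

-- ===== PRECONDITION & SPEC =====
-- Pre_solve = exactly the inputs where Python A returns: non-empty (else ValueError from max),
-- a positive maximum (else IndexError in the initial double assignment, e.g. A raises on the singleton zero list where B returns 0),
-- and every entry ≥ -(max+1) (else IndexError reading the table; entries ≤ max are always in range, negative ones wrap from the end).
def Pre_solve (num_list : List Int) : Prop :=
  1 ≤ (PySem.List.max? num_list id).getD 0 ∧
    ∀ x ∈ num_list, -((PySem.List.max? num_list id).getD 0 + 1) ≤ x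
instance (num_list : List Int) : Decidable (Pre_solve num_list) := by unfold Pre_solve; infer_instance

def pvWitness_solve : List Int := [2, 3, 4, -1, 10]

def Spec_solve (num_list : List Int) (out : Int) : Prop := out = solve_alt num_list
instance (num_list : List Int) (out : Int) : Decidable (Spec_solve num_list out) := by unfold Spec_solve; infer_instance

-- ===== CLAIM (what is proved, stated in full; the proofs are below) =====
def Claim_equal_solve : Prop := ∀ (num_list : List Int), Dom_solve num_list → Pre_solve num_list → Spec_solve num_list (solve num_list)

-- ===== LEMMAS AND PROOFS =====

-- Trial division: pvTrial k d is true iff no divisor e ≥ d with e*e ≤ k divides k.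
theorem pvTrial_true_iff (k d : Int) (hd : 2 ≤ d) :
    pvTrial k d = true ↔ ∀ e : Int, d ≤ e → e * e ≤ k → ¬ (e ∣ k) := by
  rw [pvTrial]
  by_cases hg : d * d ≤ k
  · rw [dif_pos ⟨hg, hd⟩]
    by_cases hmod : PySem.Int.mod k d = 0
    · rw [if_pos hmod]
      simp only [Bool.false_eq_true, false_iff]
      push_neg
      exact ⟨d, le_refl d, hg, (PySem.Int.mod_eq_zero_iff_dvd k d).mp hmod⟩
    · rw [if_neg hmod]
      rw [pvTrial_true_iff k (d + 1) (by omega)]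
      constructor
      · intro h e hde hek
        rcases eq_or_lt_of_le hde with heq | hlt
        · subst heq
          exact fun hdvd => hmod ((PySem.Int.mod_eq_zero_iff_dvd k d).mpr hdvd)
        · exact h e (by omega) hek
      · intro h e hde hek; exact h e (by omega) hek
  · rw [dif_neg (by tauto)]
    simp only [true_iff]
    intro e hde hek _
    have : d * d ≤ e * e := by nlinarith
    omega
termination_by (k + 1 - d).toNat
decreasing_by
  have : 2 * d ≤ d * d := by nlinarith
  omega

theorem pvIsPrime_natCast (K : Nat) : pvIsPrime (K : Int) = decide (Nat.Prime K) := by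
  unfold pvIsPrime
  by_cases hK : K < 2
  · rw [if_pos (by exact_mod_cast hK)]
    interval_cases K <;> decide
  · push_neg at hK
    rw [if_neg (by exact_mod_cast not_lt.mpr (by exact_mod_cast hK))]
    by_cases hp : Nat.Prime K
    · simp only [hp, decide_true]
      rw [pvTrial_true_iff _ _ (by norm_num)]
      intro e he hek hdvd
      have he0 : 0 ≤ e := by omega
      lift e to Nat using he0 with eN
      have heN : 2 ≤ eN := by exact_mod_cast he
      have hekN : eN * eN ≤ K := by exact_mod_cast hek
      have hdvdN : eN ∣ K := by exact_mod_cast hdvd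
      have := (Nat.prime_def_le_sqrt.mp hp).2 eN heN (Nat.le_sqrt.mpr hekN)
      exact this hdvdN
    · simp only [hp, decide_false]
      rw [show (pvTrial (K : Int) 2 = false) ↔ ¬ (pvTrial (K : Int) 2 = true) by simp]
      rw [pvTrial_true_iff _ _ (by norm_num)]
      intro hall
      apply hp
      rw [Nat.prime_def_le_sqrt]
      refine ⟨hK, fun mN hm hsq hdvd => ?_⟩
      have := hall (mN : Int) (by exact_mod_cast hm) (by exact_mod_cast Nat.le_sqrt.mp hsq)
      exact this (by exact_mod_cast hdvd)

-- Inner sieve loop: length is preserved and the entries it writes are exactly the i*j', j' ≥ j.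
theorem pvInner_length (m i j : Int) (ns : List Bool) : (pvInner m i j ns).length = ns.length := by
  rw [pvInner]
  split
  · rw [pvInner_length]; simp
  · rfl
termination_by (m + 1 - j * i).toNat
decreasing_by
  have : (j + 1) * i = j * i + i := by ring
  omega

theorem pvInner_get_miss (m i j : Int) (ns : List Bool) (hi : 1 ≤ i) (hj : 0 ≤ j) (k : Nat)
    (hmiss : ∀ j' : Int, j ≤ j' → i * j' ≤ m → i * j' ≠ (k : Int)) :
    (pvInner m i j ns)[k]? = ns[k]? := by
  rw [pvInner]
  split
  next h =>
    have hij : 0 ≤ i * j := mul_nonneg (by omega) hj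
    have hne : (i * j).toNat ≠ k := by
      intro he
      exact hmiss j le_rfl (by rw [Int.mul_comm i j]; exact h.1) (by omega)
    rw [pvInner_get_miss m i (j + 1) _ hi (by omega) k (fun j' hj' => hmiss j' (by omega))]
    exact List.getElem?_set_ne hne
  next => rfl
termination_by (m + 1 - j * i).toNat
decreasing_by
  have : (j + 1) * i = j * i + i := by ring
  omega

theorem pvInner_get_hit (m i j : Int) (ns : List Bool) (hi : 1 ≤ i) (hj : 0 ≤ j) (k : Nat)
    (hk : k < ns.length) (j' : Int) (hj' : j ≤ j') (hle : i * j' ≤ m) (heq : i * j' = (k : Int)) :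
    (pvInner m i j ns)[k]? = some false := by
  rw [pvInner]
  have hg1 : j * i ≤ m := by
    have : i * j ≤ i * j' := mul_le_mul_of_nonneg_left hj' (by omega)
    rw [mul_comm]; omega
  rw [dif_pos ⟨hg1, hi⟩]
  rcases eq_or_lt_of_le hj' with hcase | hcase
  · subst hcase
    have hij : 0 ≤ i * j := mul_nonneg (by omega) hj
    have hkeq : (i * j).toNat = k := by omega
    rw [pvInner_get_miss m i (j + 1) _ hi (by omega) k ?nomore]
    case nomore =>
      intro j'' hj'' _
      have : i * (j + 1) ≤ i * j'' := mul_le_mul_of_nonneg_left hj'' (by omega)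
      have h2 : i * (j + 1) = i * j + i := by ring
      omega
    rw [← hkeq]
    exact List.getElem?_set_self (by omega)
  · exact pvInner_get_hit m i (j + 1) _ hi (by omega) k (by simpa using hk) j' (by omega) hle heq
termination_by (m + 1 - j * i).toNat
decreasing_by
  have : (j + 1) * i = j * i + i := by ring
  omega

-- A's sieve as a fold over Nat indices, and the invariant predicate it maintains.
def pvStep (m : Int) (ns : List Bool) (i : Int) : List Bool :=
  if ns.getD i.toNat true = false then ns else pvInner m i 2 ns

def pvInit (m : Int) : List Bool :=
  ((((PySem.List.pyRange 0 (m + 1)).map (fun _ => true)).set 0 false).set 1 false)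

def pvF (m : Int) (t : Nat) : List Bool :=
  (List.range t).foldl (fun ns (iN : Nat) => pvStep m ns (iN : Int)) (pvInit m)

def pvPB (t k : Nat) : Bool := decide (2 ≤ k ∧ ∀ p, p < t → p.Prime → p ∣ k → p = k)

theorem pvPB_true_iff (t k : Nat) :
    pvPB t k = true ↔ (2 ≤ k ∧ ∀ p, p < t → p.Prime → p ∣ k → p = k) := by
  unfold pvPB; exact decide_eq_true_iff

theorem pvPB_prime (t : Nat) (ht : 2 ≤ t) : pvPB t t = true ↔ Nat.Prime t := by
  rw [pvPB_true_iff]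
  constructor
  · rintro ⟨h2, hall⟩
    rw [Nat.prime_def_minFac]
    refine ⟨h2, ?_⟩
    by_contra hne
    have hmfp : t.minFac.Prime := Nat.minFac_prime (by omega)
    have hdvd : t.minFac ∣ t := Nat.minFac_dvd t
    have hlt : t.minFac < t := lt_of_le_of_ne (Nat.le_of_dvd (by omega) hdvd) hne
    exact hne (hall _ hlt hmfp hdvd)
  · intro hp
    exact ⟨ht, fun p _ hpp hdvd => (hp.eq_one_or_self_of_dvd p hdvd).resolve_left hpp.ne_one⟩

theorem pvPB_of_lt (t k : Nat) (hk : k < t) : pvPB t k = decide (Nat.Prime k) := by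
  by_cases hk2 : 2 ≤ k
  · rcases e : decide (Nat.Prime k) with _ | _
    · simp only [decide_eq_false_iff_not] at e
      rw [← Bool.not_eq_true, pvPB_true_iff]
      rintro ⟨h2, hall⟩
      apply e
      rw [Nat.prime_def_minFac]
      refine ⟨hk2, ?_⟩
      by_contra hne
      have hmfp : k.minFac.Prime := Nat.minFac_prime (by omega)
      have hdvd : k.minFac ∣ k := Nat.minFac_dvd k
      have hlt : k.minFac < k := lt_of_le_of_ne (Nat.le_of_dvd (by omega) hdvd) hne
      exact hne (hall _ (by omega) hmfp hdvd)
    · simp only [decide_eq_true_iff] at e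
      rw [pvPB_true_iff]
      exact ⟨hk2, fun p _ hpp hdvd => (e.eq_one_or_self_of_dvd p hdvd).resolve_left hpp.ne_one⟩
  · have h1 : ¬ Nat.Prime k := fun hp => hk2 hp.two_le
    have h2 : pvPB t k = false := by
      rw [← Bool.not_eq_true, pvPB_true_iff]
      rintro ⟨h, _⟩
      omega
    simp [h2, h1]

theorem pvF_succ (m : Int) (t : Nat) : pvF m (t + 1) = pvStep m (pvF m t) (t : Int) := by
  unfold pvF
  rw [List.range_succ, List.foldl_append]
  rfl

theorem pvInit_length (m : Int) : (pvInit m).length = (m + 1).toNat := by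
  unfold pvInit
  simp [PySem.List.pyRange_one]

theorem pvInit_get (m : Int) (hm : 1 ≤ m) (k : Nat) (hk : k < (m + 1).toNat) :
    (pvInit m)[k]? = some (pvPB 0 k) := by
  have hlen : ((PySem.List.pyRange 0 (m + 1)).map (fun (_ : Int) => true)).length = (m + 1).toNat := by
    simp [PySem.List.pyRange_one]
  unfold pvInit
  have hpb : pvPB 0 k = decide (2 ≤ k) := by
    unfold pvPB
    simp only [decide_eq_decide]
    constructor
    · exact fun h => h.1
    · exact fun h => ⟨h, fun p hp => by omega⟩
  match k, hk with
  | 0, _ =>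
    rw [List.getElem?_set_ne (by omega), List.getElem?_set_self (by omega)]
    simp [hpb]
  | 1, _ =>
    rw [List.getElem?_set_self (by simp only [List.length_set, hlen]; omega)]
    simp [hpb]
  | (n + 2), hk =>
    rw [List.getElem?_set_ne (by omega), List.getElem?_set_ne (by omega)]
    rw [List.getElem?_map]
    have hr : (PySem.List.pyRange 0 (m + 1))[n + 2]? = some ((0 : Int) + ((n + 2 : Nat) : Int)) := by
      rw [PySem.List.pyRange_one, List.getElem?_map, List.getElem?_range (by omega)]
      rfl
    rw [hr]
    simp [hpb]

-- The sieve invariant: after processing outer indices 0..t-1, entry k is true iff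
-- k ≥ 2 and no prime p < t divides k other than k itself.
theorem pvF_get (m : Int) (hm : 1 ≤ m) (t : Nat) (ht : t ≤ (m + 1).toNat) :
    (pvF m t).length = (m + 1).toNat ∧
      ∀ k : Nat, k < (m + 1).toNat → (pvF m t)[k]? = some (pvPB t k) := by
  induction t with
  | zero =>
    constructor
    · simpa [pvF] using pvInit_length m
    · intro k hk
      simpa [pvF] using pvInit_get m hm k hk
  | succ t ih =>
    obtain ⟨ihlen, ihget⟩ := ih (by omega)
    rw [pvF_succ]
    unfold pvStep
    have htL : t < (m + 1).toNat := by omega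
    have hget_t : (pvF m t).getD ((t : Int)).toNat true = pvPB t t := by
      rw [Int.toNat_natCast, List.getD_eq_getElem?_getD, ihget t htL]
      rfl
    by_cases hb : pvPB t t = true
    · have h2t : 2 ≤ t := ((pvPB_true_iff t t).mp hb).1
      have hprime : Nat.Prime t := (pvPB_prime t h2t).mp hb
      have hi : (1 : Int) ≤ (t : Int) := by exact_mod_cast (by omega : 1 ≤ t)
      rw [hget_t, if_neg (by simp [hb])]
      constructor
      · rw [pvInner_length]; exact ihlen
      · intro k hk
        by_cases hhit : ∃ q : Nat, 2 ≤ q ∧ t * q = k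
        · obtain ⟨q, hq2, hqk⟩ := hhit
          have hle : (t : Int) * (q : Int) ≤ m := by
            have : (t * q : Nat) = k := hqk
            have hkm : k ≤ m.toNat := by omega
            push_cast [← this] at hkm ⊢
            omega
          rw [pvInner_get_hit m (t : Int) 2 _ hi (by norm_num) k (by omega)
                (q : Int) (by exact_mod_cast hq2) hle (by push_cast [← hqk]; ring)]
          have hfalse : pvPB (t + 1) k = false := by
            rw [← Bool.not_eq_true, pvPB_true_iff]
            rintro ⟨h2k, hall⟩
            have hkt := hall t (by omega) hprime ⟨q, hqk.symm⟩
            have hk2t : 2 * t ≤ k := by nlinarith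
            omega
          rw [hfalse]
        · have hmiss : ∀ j' : Int, 2 ≤ j' → (t : Int) * j' ≤ m → (t : Int) * j' ≠ (k : Int) := by
            intro j' hj2 hjle hjeq
            apply hhit
            refine ⟨j'.toNat, by omega, ?_⟩
            have hj'' : j' = ((j'.toNat : Nat) : Int) := (Int.toNat_of_nonneg (by omega)).symm
            rw [hj''] at hjeq
            exact_mod_cast hjeq
          rw [pvInner_get_miss m (t : Int) 2 _ hi (by norm_num) k hmiss, ihget k hk]
          congr 1
          rw [Bool.eq_iff_iff, pvPB_true_iff, pvPB_true_iff]
          constructor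
          · rintro ⟨h2k, hall⟩
            refine ⟨h2k, fun p hp hpp hdvd => ?_⟩
            rcases Nat.lt_succ_iff_lt_or_eq.mp hp with hlt | heq
            · exact hall p hlt hpp hdvd
            · subst heq
              obtain ⟨q, hq⟩ := hdvd
              match q, hq with
              | 0, hq => omega
              | 1, hq => omega
              | (q + 2), hq => exact absurd ⟨q + 2, by omega, hq.symm⟩ hhit
          · rintro ⟨h2k, hall⟩
            exact ⟨h2k, fun p hp hpp hdvd => hall p (by omega) hpp hdvd⟩
    · have htP : ¬ Nat.Prime t := fun hp => hb ((pvPB_prime t hp.two_le).mpr hp)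
      rw [hget_t, if_pos (by simpa using hb)]
      refine ⟨ihlen, fun k hk => ?_⟩
      rw [ihget k hk]
      congr 1
      rw [Bool.eq_iff_iff, pvPB_true_iff, pvPB_true_iff]
      constructor
      · rintro ⟨h2k, hall⟩
        refine ⟨h2k, fun p hp hpp hdvd => ?_⟩
        rcases Nat.lt_succ_iff_lt_or_eq.mp hp with hlt | heq
        · exact hall p hlt hpp hdvd
        · subst heq; exact absurd hpp htP
      · rintro ⟨h2k, hall⟩
        exact ⟨h2k, fun p hp hpp hdvd => hall p (by omega) hpp hdvd⟩

-- The finished sieve table equals B's trial-division table.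
theorem pv_table_eq (m : Int) (hm : 1 ≤ m) :
    pvF m (m + 1).toNat = (PySem.List.pyRange 0 (m + 1)).map pvIsPrime := by
  obtain ⟨hlen, hget⟩ := pvF_get m hm (m + 1).toNat le_rfl
  apply List.ext_getElem?
  intro n
  by_cases hn : n < (m + 1).toNat
  · rw [hget n hn]
    have hr : (PySem.List.pyRange 0 (m + 1))[n]? = some ((0 : Int) + (n : Int)) := by
      rw [PySem.List.pyRange_one, List.getElem?_map, List.getElem?_range (by omega)]
      rfl
    rw [List.getElem?_map, hr]
    simp only [Option.map_some, zero_add]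
    rw [pvPB_of_lt _ n hn, pvIsPrime_natCast n]
  · rw [List.getElem?_eq_none (by omega : (pvF m (m + 1).toNat).length ≤ n),
        List.getElem?_eq_none]
    rw [List.length_map, PySem.List.pyRange_one, List.length_map, List.length_range]
    omega

theorem main_eq : ∀ (num_list : List Int), Pre_solve num_list → solve num_list = solve_alt num_list := by
  intro l hp
  unfold solve solve_alt
  cases hmax : PySem.List.max? l id with
  | none => rfl
  | some m =>
    have hm : 1 ≤ m := by
      have := hp.1
      rw [hmax] at this
      simpa using this
    simp only []
    have hA : (PySem.List.pyRange 0 (m + 1)).foldl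
        (fun ns i => if ns.getD i.toNat true = false then ns else pvInner m i 2 ns)
        ((((PySem.List.pyRange 0 (m + 1)).map (fun _ => true)).set 0 false).set 1 false)
        = pvF m (m + 1).toNat := by
      rw [show (((PySem.List.pyRange 0 (m + 1)).map (fun (_ : Int) => true)).set 0 false).set 1 false
            = pvInit m from rfl]
      unfold pvF pvStep
      rw [PySem.List.pyRange_one, List.foldl_map]
      simp only [zero_add]
      norm_num
    rw [hA, pv_table_eq m hm]

-- ===== VERDICT (by name: the statement is the Claim_ definition above) =====
theorem solve_spec : Claim_equal_solve := by
  intro l _ hp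
  unfold Spec_solve
  exact main_eq l hp
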